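-- pv_equiv track=rewrite | github.com/hcyogeesh/codemind-python | Little_Monk_and_Good_String.py | longest_good_substring
-- ===== SOURCE A (Python) =====
-- def longest_good_substring(s):
--     vowels = set(['a', 'e', 'i', 'o', 'u'])
--     max_length = 0
--     current_length = 0
--     for char in s:
--         if char in vowels:
--             current_length += 1
--             max_length = max(max_length, current_length)
--         else:
--             current_length = 0
--     return max_length
-- ===== SOURCE B (Python) =====
-- import re
--
-- def longest_good_substring(s):
--     return max((len(run) for run in re.findall(r'[aeiou]+', s)), default=0)
-- ===== Notes on version B (the rewrite author's own statement) =====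
-- stated objective: idiomatic
-- what changed: Replaces the inline running-counter loop with a two-stage regex approach: extract every maximal vowel run with re.findall(r'[aeiou]+', s) and take the max of their lengths (default 0).
import Mathlib
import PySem

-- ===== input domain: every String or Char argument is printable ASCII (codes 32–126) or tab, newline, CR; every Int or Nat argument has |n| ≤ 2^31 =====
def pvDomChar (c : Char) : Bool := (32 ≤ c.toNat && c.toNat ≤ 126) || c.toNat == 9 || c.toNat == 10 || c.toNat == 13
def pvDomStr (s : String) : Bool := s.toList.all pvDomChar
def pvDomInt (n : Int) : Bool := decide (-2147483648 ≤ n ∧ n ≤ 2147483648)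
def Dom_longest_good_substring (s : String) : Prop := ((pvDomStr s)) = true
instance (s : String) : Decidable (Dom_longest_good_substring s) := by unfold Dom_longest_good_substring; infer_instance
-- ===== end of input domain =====

-- B replaces A's running-counter loop by extracting every maximal vowel run first and
-- then taking the maximum of the run lengths (default 0); same cost, more declarative.

-- ===== PORT A =====
-- A: one pass keeping (max_length, current_length); vowels is a Python set literal.
def longest_good_substring (s : String) : Int :=
  let vowels : PySem.Set Char := PySem.Set.ofList ['a', 'e', 'i', 'o', 'u']
  let st := s.toList.foldl
    (fun (p : Int × Int) char =>
      if PySem.Set.contains vowels char then (max p.1 (p.2 + 1), p.2 + 1)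
      else (p.1, (0 : Int)))
    ((0 : Int), (0 : Int))
  st.1

-- ===== PORT B =====
-- hand port of re.findall(r'[aeiou]+', s): the lengths of the maximal vowel runs, in order
def pvIsVowel (c : Char) : Bool :=
  decide (c = 'a') || decide (c = 'e') || decide (c = 'i') || decide (c = 'o') || decide (c = 'u')

def pvVowelRuns : List Char → Int → List Int
  | [], cur => if cur > 0 then [cur] else []
  | c :: t, cur =>
      if pvIsVowel c then pvVowelRuns t (cur + 1)
      else if cur > 0 then cur :: pvVowelRuns t 0 else pvVowelRuns t 0

-- B: max over the lengths of the extracted vowel runs, default 0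
def longest_good_substring_alt (s : String) : Int :=
  (pvVowelRuns s.toList 0).foldl max 0

-- ===== PRECONDITION & SPEC =====
def Spec_longest_good_substring (s : String) (out : Int) : Prop := out = longest_good_substring_alt s
instance (s : String) (out : Int) : Decidable (Spec_longest_good_substring s out) := by unfold Spec_longest_good_substring; infer_instance

-- ===== CLAIM (what is proved, stated in full; the proofs are below) =====
def Claim_equal_longest_good_substring : Prop := ∀ (s : String), Dom_longest_good_substring s → Spec_longest_good_substring s (longest_good_substring s)

-- ===== LEMMAS AND PROOFS =====

theorem pv_contains_vowels (c : Char) :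
    PySem.Set.contains (PySem.Set.ofList ['a', 'e', 'i', 'o', 'u']) c = pvIsVowel c := by
  have h : PySem.Set.ofList ['a', 'e', 'i', 'o', 'u'] = ['a', 'e', 'i', 'o', 'u'] := by decide
  rw [h]
  simp [PySem.Set.contains, pvIsVowel, Bool.or_assoc]

-- absorbing a positive pending run length into the accumulator does not change the max
theorem pv_foldl_absorb (t : List Char) (c : Int) (hc : 0 < c) (m : Int) :
    List.foldl max m (pvVowelRuns t c) = List.foldl max (max m c) (pvVowelRuns t c) := by
  induction t generalizing c m with
  | nil => simp [pvVowelRuns, hc]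
  | cons h t ih =>
      by_cases hv : pvIsVowel h = true
      · simp only [pvVowelRuns, hv, if_true]
        rw [ih (c + 1) (by omega) m, ih (c + 1) (by omega) (max m c)]
        have : max (max m c) (c + 1) = max m (c + 1) := by omega
        rw [this]
      · simp only [pvVowelRuns, hv, hc, if_true]
        simp

-- loop invariant: A's fold from state (m, c) equals the max of m, c and the remaining runs
theorem pv_loop_eq (l : List Char) (m c : Int) (h0 : 0 ≤ c) (hcm : c ≤ m) :
    (List.foldl
      (fun (p : Int × Int) char =>
        if PySem.Set.contains (PySem.Set.ofList ['a', 'e', 'i', 'o', 'u']) char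
        then (max p.1 (p.2 + 1), p.2 + 1) else (p.1, (0 : Int)))
      (m, c) l).1 = List.foldl max (max m c) (pvVowelRuns l c) := by
  induction l generalizing m c with
  | nil =>
      simp only [List.foldl_nil, pvVowelRuns]
      split_ifs <;> simp <;> omega
  | cons h t ih =>
      rw [List.foldl_cons, pv_contains_vowels]
      by_cases hv : pvIsVowel h = true
      · simp only [hv, if_true]
        rw [ih (max m (c + 1)) (c + 1) (by omega) (by omega)]
        simp only [pvVowelRuns, hv, if_true]
        have h1 : max (max m (c + 1)) (c + 1) = max m (c + 1) := by omega
        have h2 : max m c = m := by omega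
        rw [h1, h2, pv_foldl_absorb t (c + 1) (by omega) m]
      · rw [if_neg (by simp [hv])]
        rw [ih m 0 (by omega) (by omega)]
        simp only [pvVowelRuns]
        rw [if_neg (by simp [hv])]
        by_cases hc : c > 0
        · rw [if_pos hc, List.foldl_cons]
          have : max (max m c) c = max m 0 := by omega
          rw [this]
        · have hc0 : c = 0 := by omega
          simp [hc0]

-- ===== VERDICT (by name: the statement is the Claim_ definition above) =====
theorem longest_good_substring_spec : Claim_equal_longest_good_substring := by
  intro s _
  show _ = _
  unfold longest_good_substring longest_good_substring_alt
  simpa using pv_loop_eq s.toList 0 0 (by omega) (by omega)
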